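-- pv_equiv track=rewrite | github.com/busugaacevedo/ACUAPEPTIDE | ACUAPEPTIDE_v3.py | count_aa_per_block
-- ===== SOURCE A (Python) =====
-- from collections import Counter
--
-- AA_DICT = {
--     "A": "ALA", "R": "ARG", "N": "ASN", "D": "ASP", "C": "CYS",
--     "Q": "GLN", "E": "GLU", "G": "GLY", "H": "HIS", "I": "ILE",
--     "L": "LEU", "K": "LYS", "M": "MET", "F": "PHE", "P": "PRO",
--     "S": "SER", "T": "THR", "W": "TRP", "Y": "TYR", "V": "VAL"
-- }
--
-- def count_aa_per_block(cycles, block_size=10):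
--     blocks = []
--     # Creamos un mapa inverso de nombre -> letra (ej: 'Alanina': 'A')
--     # Esto asume que tienes un diccionario inverso o lo creamos aquí
--     INV_AA_DICT = {v: k for k, v in AA_DICT.items()}
--     for i in range(0, len(cycles), block_size):
--         block_cycles = cycles[i:i+block_size]
--         block_counter = Counter()
--         for aa_positions, _, _ in block_cycles:
--             for aa_name, peps in aa_positions.items():
--                 # 🔥 PASO CLAVE: Convertir el nombre a letra para que coincida con FMOC_MW
--                 # Si aa_name ya es la letra, esto no hará nada malo
--                 aa_letter = INV_AA_DICT.get(aa_name, aa_name)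
--                 block_counter[aa_letter] += len(peps)
--         blocks.append((i+1, i+len(block_cycles), block_counter))
--     return blocks
-- ===== SOURCE B (Python) =====
-- from collections import Counter
--
-- AA_DICT = {
--     "A": "ALA", "R": "ARG", "N": "ASN", "D": "ASP", "C": "CYS",
--     "Q": "GLN", "E": "GLU", "G": "GLY", "H": "HIS", "I": "ILE",
--     "L": "LEU", "K": "LYS", "M": "MET", "F": "PHE", "P": "PRO",
--     "S": "SER", "T": "THR", "W": "TRP", "Y": "TYR", "V": "VAL"
-- }
--
-- def count_aa_per_block(cycles, block_size=10):
--     # Single flat pass over the cycles (no index ranges, no slicing): a new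
--     # block is opened whenever the index is a multiple of block_size, and the
--     # current (last) block's end and Counter are updated in place.
--     INV_AA_DICT = {v: k for k, v in AA_DICT.items()}
--     if block_size <= 0:
--         return []
--     blocks = []
--     for i, (aa_positions, _, _) in enumerate(cycles):
--         if i % block_size == 0:
--             blocks.append([i + 1, i + 1, Counter()])
--         blk = blocks[-1]
--         blk[1] = i + 1
--         for aa_name, peps in aa_positions.items():
--             blk[2][INV_AA_DICT.get(aa_name, aa_name)] += len(peps)
--     return [tuple(b) for b in blocks]
-- ===== Notes on version B (the rewrite author's own statement) =====
-- stated objective: simpler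
-- what changed: Replaces A's outer loop over range(0, len(cycles), block_size) with per-block slicing by one flat pass over enumerate(cycles) that opens a new block whenever the index is divisible by block_size and extends the current block's end and Counter in place (no intermediate slice lists).
import Mathlib
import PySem

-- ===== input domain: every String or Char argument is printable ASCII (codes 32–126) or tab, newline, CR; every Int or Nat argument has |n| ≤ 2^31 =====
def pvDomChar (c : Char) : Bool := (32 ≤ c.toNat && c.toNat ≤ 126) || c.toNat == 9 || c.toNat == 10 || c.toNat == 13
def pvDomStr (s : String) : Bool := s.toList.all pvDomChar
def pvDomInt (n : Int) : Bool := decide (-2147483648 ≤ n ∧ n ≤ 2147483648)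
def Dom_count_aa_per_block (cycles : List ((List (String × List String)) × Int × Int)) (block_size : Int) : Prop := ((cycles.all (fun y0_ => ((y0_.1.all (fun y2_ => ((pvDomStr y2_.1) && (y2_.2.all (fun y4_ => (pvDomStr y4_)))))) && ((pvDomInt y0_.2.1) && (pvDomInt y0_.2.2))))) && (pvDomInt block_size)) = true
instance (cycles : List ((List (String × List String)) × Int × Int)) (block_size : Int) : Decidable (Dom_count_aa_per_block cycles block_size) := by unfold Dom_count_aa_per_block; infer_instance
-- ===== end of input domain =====

-- B replaces A's range-and-slice outer loop by one flat pass over enumerate(cycles) that opens a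
-- block whenever the index is divisible by block_size (objective: simpler, no intermediate slices).
-- ===== PORT A =====
-- AA_DICT (module constant) and the shared inner per-cycle loop body
-- 'for aa_name, peps in aa_positions.items(): counter[INV.get(aa_name, aa_name)] += len(peps)'
-- (textually identical in A and B) are shared helpers.
def pvAADict : PySem.Dict String String :=
  PySem.Dict.ofList [("A","ALA"),("R","ARG"),("N","ASN"),("D","ASP"),("C","CYS"),
                     ("Q","GLN"),("E","GLU"),("G","GLY"),("H","HIS"),("I","ILE"),
                     ("L","LEU"),("K","LYS"),("M","MET"),("F","PHE"),("P","PRO"),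
                     ("S","SER"),("T","THR"),("W","TRP"),("Y","TYR"),("V","VAL")]

-- INV_AA_DICT = {v: k for k, v in AA_DICT.items()}
def pvInvDict : PySem.Dict String String :=
  pvAADict.items.foldl (fun d kv => d.insert kv.2 kv.1) PySem.Dict.empty

-- the inner 'for aa_name, peps in aa_positions.items()' loop, adding one cycle into a counter
def pvCellFold (c : PySem.Dict String Int)
    (cell : (List (String × List String)) × Int × Int) : PySem.Dict String Int :=
  cell.1.foldl (fun c kv =>
    let aa_letter := (pvInvDict.get? kv.1).getD kv.1
    c.modify aa_letter 0 (· + (kv.2.length : Int))) c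

def count_aa_per_block (cycles : List ((List (String × List String)) × Int × Int)) (block_size : Int) : List (Int × Int × (List (String × Int))) :=
  (PySem.List.pyRange 0 (cycles.length : Int) block_size).foldl
    (fun blocks i =>
      let block_cycles := PySem.List.slice cycles (some i) (some (i + block_size))
      let block_counter := block_cycles.foldl pvCellFold PySem.Dict.empty
      blocks ++ [(i + 1, i + (block_cycles.length : Int), block_counter.items)]) []

-- ===== PORT B =====
-- one step of B's flat pass: p = (i, cycle); open a new block when i % block_size == 0,
-- then update the last block's end and counter in place
def pvStep (block_size : Int)
    (blocks : List (Int × Int × PySem.Dict String Int))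
    (p : Int × ((List (String × List String)) × Int × Int)) :
    List (Int × Int × PySem.Dict String Int) :=
  let i := p.1
  let blocks := if PySem.Int.mod i block_size = 0
                then blocks ++ [(i + 1, i + 1, PySem.Dict.empty)] else blocks
  match blocks.getLast? with
  | none => blocks
  | some (s, _, c) => blocks.dropLast ++ [(s, i + 1, pvCellFold c p.2)]

def count_aa_per_block_alt (cycles : List ((List (String × List String)) × Int × Int)) (block_size : Int) : List (Int × Int × (List (String × Int))) :=
  if block_size ≤ 0 then []
  else ((PySem.List.enumerate cycles 0).foldl (pvStep block_size) []).map
         (fun b => (b.1, b.2.1, b.2.2.items))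

-- ===== PRECONDITION & SPEC =====
-- Pre_ excludes only block_size = 0, where Python A raises ValueError (range() step 0).
def Pre_count_aa_per_block (cycles : List ((List (String × List String)) × Int × Int)) (block_size : Int) : Prop := block_size ≠ 0
instance (cycles : List ((List (String × List String)) × Int × Int)) (block_size : Int) : Decidable (Pre_count_aa_per_block cycles block_size) := by unfold Pre_count_aa_per_block; infer_instance

def pvWitness_count_aa_per_block : (List ((List (String × List String)) × Int × Int)) × Int :=
  ([([("ALA", ["p1", "p2"]), ("G", ["p3"])], 1, 2), ([("foo", ["p4"])], 0, 0)], 1)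

def Spec_count_aa_per_block (cycles : List ((List (String × List String)) × Int × Int)) (block_size : Int) (out : List (Int × Int × (List (String × Int)))) : Prop := out = count_aa_per_block_alt cycles block_size
instance (cycles : List ((List (String × List String)) × Int × Int)) (block_size : Int) (out : List (Int × Int × (List (String × Int)))) : Decidable (Spec_count_aa_per_block cycles block_size out) := by unfold Spec_count_aa_per_block; infer_instance

-- ===== CLAIM (what is proved, stated in full; the proofs are below) =====
def Claim_equal_count_aa_per_block : Prop := ∀ (cycles : List ((List (String × List String)) × Int × Int)) (block_size : Int), Dom_count_aa_per_block cycles block_size → Pre_count_aa_per_block cycles block_size → Spec_count_aa_per_block cycles block_size (count_aa_per_block cycles block_size)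

-- ===== LEMMAS AND PROOFS =====

def pvSpecBlocks (b : Nat) :
    List ((List (String × List String)) × Int × Int) → Nat →
    List (Int × Int × PySem.Dict String Int)
  | [], _ => []
  | c :: rest, off =>
      ((off : Int) + 1,
       (off : Int) + ((min (b + 1) (c :: rest).length : Nat) : Int),
       ((c :: rest).take (b + 1)).foldl pvCellFold PySem.Dict.empty) ::
      pvSpecBlocks b (rest.drop b) (off + (b + 1))
  termination_by cs _ => cs.length
  decreasing_by simp


lemma pvRange_pos_cons (a bnd s : Int) (hs : 0 < s) (hab : a < bnd) :
    PySem.List.pyRange a bnd s = a :: PySem.List.pyRange (a + s) bnd s := by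
  have hs0 : s ≠ 0 := by omega
  rw [PySem.List.pyRange_of_pos _ _ hs, PySem.List.pyRange_of_pos _ _ hs]
  rw [if_pos hab]
  by_cases h2 : a + s < bnd
  · rw [if_pos h2]
    have key : ((bnd - a + s - 1) / s).toNat = ((bnd - (a + s) + s - 1) / s).toNat + 1 := by
      have he : bnd - a + s - 1 = (bnd - (a + s) + s - 1) + 1 * s := by ring
      have hnn : 0 ≤ (bnd - (a + s) + s - 1) / s := Int.ediv_nonneg (by omega) (by omega)
      rw [he, Int.add_mul_ediv_right _ _ hs0]
      omega
    rw [key, List.range_succ_eq_map]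
    simp only [List.map_cons, List.map_map, Nat.cast_zero, mul_zero, add_zero]
    refine congrArg _ ?_
    refine List.map_congr_left ?_
    intro k _
    simp only [Function.comp, Nat.succ_eq_add_one]
    push_cast
    ring
  · rw [if_neg h2]
    have hq : (bnd - a + s - 1) / s = 1 := by
      have h1 : 1 ≤ (bnd - a + s - 1) / s := (Int.le_ediv_iff_mul_le hs).mpr (by omega)
      have h2' : (bnd - a + s - 1) / s < 2 := (Int.ediv_lt_iff_lt_mul hs).mpr (by omega)
      omega
    rw [hq]
    simp

lemma pvLemBin (bs : Int) (hbs : 0 < bs)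
    (ys : List ((List (String × List String)) × Int × Int)) :
    ∀ (j : Int), (∀ k : Nat, k < ys.length → PySem.Int.mod (j + (k : Int)) bs ≠ 0) →
    ∀ (done : List (Int × Int × PySem.Dict String Int)) (s : Int) (c : PySem.Dict String Int),
    (PySem.List.enumerate ys j).foldl (pvStep bs) (done ++ [(s, j, c)])
      = done ++ [(s, j + (ys.length : Int), ys.foldl pvCellFold c)] := by
  induction ys with
  | nil => intro j _ done s c; simp [PySem.List.enumerate]
  | cons y ys ih =>
    intro j hmod done s c
    rw [PySem.List.enumerate_cons]
    rw [List.foldl_cons]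
    have h0 : PySem.Int.mod (j + ((0 : Nat) : Int)) bs ≠ 0 := hmod 0 (by simp)
    have hstep : pvStep bs (done ++ [(s, j, c)]) (j, y)
        = done ++ [(s, j + 1, pvCellFold c y)] := by
      simp only [pvStep]
      rw [if_neg (by simpa using h0)]
      rw [List.getLast?_concat, List.dropLast_concat]
    rw [hstep]
    rw [ih (j + 1) (fun k hk => by
        have := hmod (k + 1) (by simpa using Nat.succ_lt_succ hk)
        push_cast at this ⊢
        convert this using 2
        ring)]
    simp only [List.length_cons, List.foldl_cons]
    have : j + 1 + (ys.length : Int) = j + ((ys.length + 1 : Nat) : Int) := by push_cast; ring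
    rw [this]

lemma pvLemB (b : Nat)
    (cs : List ((List (String × List String)) × Int × Int)) :
    ∀ (m : Nat) (done : List (Int × Int × PySem.Dict String Int)),
    (PySem.List.enumerate cs ((m * (b + 1) : Nat) : Int)).foldl (pvStep ((b : Int) + 1)) done
      = done ++ pvSpecBlocks b cs (m * (b + 1)) := by
  have hbs : (0 : Int) < (b : Int) + 1 := by positivity
  suffices H : ∀ (fuel : Nat) (cs : List ((List (String × List String)) × Int × Int)),
      cs.length ≤ fuel → ∀ (m : Nat) (done : List (Int × Int × PySem.Dict String Int)),
      (PySem.List.enumerate cs ((m * (b + 1) : Nat) : Int)).foldl (pvStep ((b : Int) + 1)) done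
        = done ++ pvSpecBlocks b cs (m * (b + 1)) by
    exact fun m done => H cs.length cs le_rfl m done
  intro fuel
  induction fuel with
  | zero =>
    intro cs hcs m done
    have : cs = [] := List.length_eq_zero_iff.mp (by omega)
    subst this
    simp [PySem.List.enumerate, pvSpecBlocks]
  | succ fuel ih =>
    intro cs hcs m done
    match cs with
    | [] => simp [PySem.List.enumerate, pvSpecBlocks]
    | c :: rest =>
      rw [PySem.List.enumerate_cons, List.foldl_cons]
      set i : Int := ((m * (b + 1) : Nat) : Int) with hi
      have hmod0 : PySem.Int.mod i ((b : Int) + 1) = 0 := by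
        rw [PySem.Int.mod_eq_zero_iff_dvd]
        exact ⟨(m : Int), by rw [hi]; push_cast; ring⟩
      have hstep : pvStep ((b : Int) + 1) done (i, c)
          = done ++ [(i + 1, i + 1, pvCellFold PySem.Dict.empty c)] := by
        simp only [pvStep]
        rw [if_pos hmod0, List.getLast?_concat, List.dropLast_concat]
      rw [hstep]
      rw [pvSpecBlocks]
      -- split rest into the remainder of this block and the later blocks
      have hsplit : rest = rest.take b ++ rest.drop b := (List.take_append_drop b rest).symm
      conv_lhs => rw [hsplit]
      rw [PySem.List.enumerate_append, List.foldl_append]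
      have htlen : (rest.take b).length = min b rest.length := List.length_take
      have hin : List.foldl (pvStep ((b : Int) + 1)) (done ++ [(i + 1, i + 1, pvCellFold PySem.Dict.empty c)])
          (PySem.List.enumerate (rest.take b) (i + 1))
          = done ++ [(i + 1, i + 1 + ((rest.take b).length : Int),
              (rest.take b).foldl pvCellFold (pvCellFold PySem.Dict.empty c))] := by
        apply pvLemBin _ hbs
        intro k hk
        have hkb : k < b := by omega
        rw [PySem.Int.mod_eq_emod_of_pos hbs]
        have harr : i + 1 + (k : Int) = (1 + (k : Int)) + ((b : Int) + 1) * (m : Int) := by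
          rw [hi]; push_cast; ring
        rw [harr, Int.add_mul_emod_self_left, Int.emod_eq_of_lt (by omega) (by push_cast; omega)]
        omega
      rw [hin]
      have hhead : ((i + 1 : Int), i + 1 + ((rest.take b).length : Int),
            (rest.take b).foldl pvCellFold (pvCellFold PySem.Dict.empty c))
          = (((m * (b + 1) : Nat) : Int) + 1,
             ((m * (b + 1) : Nat) : Int) + ((min (b + 1) (c :: rest).length : Nat) : Int),
             ((c :: rest).take (b + 1)).foldl pvCellFold PySem.Dict.empty) := by
        refine Prod.ext ?_ (Prod.ext ?_ ?_)
        · simp [hi]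
        · show i + 1 + ((rest.take b).length : Int)
              = ((m * (b + 1) : Nat) : Int) + ((min (b + 1) (c :: rest).length : Nat) : Int)
          rw [hi, htlen]
          have : min (b + 1) (c :: rest).length = 1 + min b rest.length := by simp; omega
          rw [this]; push_cast; ring
        · show (rest.take b).foldl pvCellFold (pvCellFold PySem.Dict.empty c)
              = ((c :: rest).take (b + 1)).foldl pvCellFold PySem.Dict.empty
          simp [List.take_succ_cons]
      by_cases hbig : b < rest.length
      · -- a full block, and more cycles follow
        have htl : (rest.take b).length = b := by omega
        have hnext : i + 1 + ((rest.take b).length : Int) = (((m + 1) * (b + 1) : Nat) : Int) := by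
          rw [htl, hi]; push_cast; ring
        rw [hhead, hnext]
        rw [ih (rest.drop b) (by rw [List.length_drop]; simp at hcs; omega) (m + 1)]
        rw [List.append_assoc, List.singleton_append]
        rw [show (m + 1) * (b + 1) = m * (b + 1) + (b + 1) from by ring]
      · -- the last (possibly short) block: nothing follows
        have hdrop : rest.drop b = [] := by
          apply List.eq_nil_of_length_eq_zero; rw [List.length_drop]; omega
        rw [hdrop, pvSpecBlocks, hhead]
        simp [PySem.List.enumerate]

lemma pvLemA (b : Nat) (cycles : List ((List (String × List String)) × Int × Int)) :
    ∀ (off : Nat),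
    (PySem.List.pyRange (off : Int) (cycles.length : Int) ((b : Int) + 1)).map
      (fun i =>
        let block_cycles := PySem.List.slice cycles (some i) (some (i + ((b : Int) + 1)))
        let block_counter := block_cycles.foldl pvCellFold PySem.Dict.empty
        (i + 1, i + (block_cycles.length : Int), block_counter.items))
    = (pvSpecBlocks b (cycles.drop off) off).map (fun blk => (blk.1, blk.2.1, blk.2.2.items)) := by
  have hbs : (0 : Int) < (b : Int) + 1 := by positivity
  suffices H : ∀ (fuel off : Nat), cycles.length - off ≤ fuel →
      (PySem.List.pyRange (off : Int) (cycles.length : Int) ((b : Int) + 1)).map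
        (fun i =>
          let block_cycles := PySem.List.slice cycles (some i) (some (i + ((b : Int) + 1)))
          let block_counter := block_cycles.foldl pvCellFold PySem.Dict.empty
          (i + 1, i + (block_cycles.length : Int), block_counter.items))
      = (pvSpecBlocks b (cycles.drop off) off).map (fun blk => (blk.1, blk.2.1, blk.2.2.items)) by
    exact fun off => H (cycles.length - off) off le_rfl
  intro fuel
  induction fuel with
  | zero =>
    intro off hf
    have hle : cycles.length ≤ off := by omega
    have hr : PySem.List.pyRange (off : Int) (cycles.length : Int) ((b : Int) + 1) = [] := by
      rw [PySem.List.pyRange_of_pos _ _ hbs, if_neg (by exact_mod_cast not_lt.mpr hle)]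
      simp
    have hd : cycles.drop off = [] := List.drop_eq_nil_of_le hle
    rw [hr, hd, pvSpecBlocks]
    simp
  | succ fuel ih =>
    intro off hf
    by_cases hlt : off < cycles.length
    case neg =>
      have hle : cycles.length ≤ off := by omega
      have hr : PySem.List.pyRange (off : Int) (cycles.length : Int) ((b : Int) + 1) = [] := by
        rw [PySem.List.pyRange_of_pos _ _ hbs, if_neg (by exact_mod_cast not_lt.mpr hle)]
        simp
      have hd : cycles.drop off = [] := List.drop_eq_nil_of_le hle
      rw [hr, hd, pvSpecBlocks]
      simp
    case pos =>
      rw [pvRange_pos_cons _ _ _ hbs (by exact_mod_cast hlt), List.map_cons]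
      obtain ⟨c, rest, hd⟩ : ∃ c rest, cycles.drop off = c :: rest := by
        cases hdd : cycles.drop off with
        | nil => exact absurd (List.drop_eq_nil_iff.mp hdd) (by omega)
        | cons c rest => exact ⟨c, rest, rfl⟩
      rw [hd, pvSpecBlocks, List.map_cons]
      have hslice : PySem.List.slice cycles (some (off : Int)) (some ((off : Int) + ((b : Int) + 1)))
          = (c :: rest).take (b + 1) := by
        rw [show ((off : Int) + ((b : Int) + 1)) = ((off : Int) + ((b + 1 : Nat) : Int)) from by push_cast; ring]
        rw [PySem.List.slice_natCast_add, hd]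
      congr 1
      · show ((off : Int) + 1, (off : Int) + _, _) = _
        simp only [hslice]
        refine Prod.ext ?_ (Prod.ext ?_ ?_)
        · rfl
        · show (off : Int) + (((c :: rest).take (b + 1)).length : Int)
              = (off : Int) + ((min (b + 1) (c :: rest).length : Nat) : Int)
          rw [List.length_take]
        · rfl
      · rw [show ((off : Int) + ((b : Int) + 1)) = ((off + (b + 1) : Nat) : Int) from by push_cast; ring]
        rw [ih (off + (b + 1)) (by omega)]
        congr 2
        rw [← List.drop_drop, hd]
        simp

lemma pvMain (cycles : List ((List (String × List String)) × Int × Int)) (bs : Int)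
    (hpre : bs ≠ 0) : count_aa_per_block cycles bs = count_aa_per_block_alt cycles bs := by
  by_cases hneg : bs ≤ 0
  · have hlt : bs < 0 := lt_of_le_of_ne hneg hpre
    unfold count_aa_per_block count_aa_per_block_alt
    rw [if_pos hneg]
    have hr : PySem.List.pyRange 0 (cycles.length : Int) bs = [] := by
      unfold PySem.List.pyRange
      rw [if_neg hpre, if_neg (by omega), if_neg (by exact not_lt.mpr (by positivity))]
      simp
    rw [hr]
    simp
  · have hneg2 : 0 < bs := by omega
    obtain ⟨b, rfl⟩ : ∃ b : Nat, bs = (b : Int) + 1 := ⟨(bs - 1).toNat, by omega⟩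
    unfold count_aa_per_block count_aa_per_block_alt
    rw [if_neg (by omega)]
    have hA := pvLemA b cycles 0
    simp only [Nat.cast_zero, List.drop_zero] at hA
    have hB := pvLemB b cycles 0 []
    simp only [Nat.zero_mul, Nat.cast_zero, List.nil_append] at hB
    rw [hB, ← hA]
    exact PySem.List.foldl_append_singleton_eq_map
      (fun i =>
        let block_cycles := PySem.List.slice cycles (some i) (some (i + ((b : Int) + 1)))
        let block_counter := block_cycles.foldl pvCellFold PySem.Dict.empty
        (i + 1, i + (block_cycles.length : Int), block_counter.items))
      (PySem.List.pyRange 0 (cycles.length : Int) ((b : Int) + 1)) []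

-- ===== VERDICT (by name: the statement is the Claim_ definition above) =====
theorem count_aa_per_block_spec : Claim_equal_count_aa_per_block := by
  intro cycles block_size _ hpre
  unfold Spec_count_aa_per_block
  exact pvMain cycles block_size hpre
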